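-- pv_equiv track=rewrite | github.com/KalkiEshwarD/VIT_BCSE101E | Mock_FAT/ex22.py | string_mirrorer
-- ===== SOURCE A (Python) =====
-- def string_mirrorer(string0):
--     CAPS_LETTERS = ['A', 'B', 'C', 'D', 'E', 'F', 'G', 'H', 'I', 'J', 'K', 'L', 'M', 'N', 'O', 'P', 'Q', 'R', 'S', 'T', 'U', 'V', 'W', 'X', 'Y', 'Z']
--     LOWS_LETTERS = ['a', 'b', 'c', 'd', 'e', 'f', 'g', 'h', 'i', 'j', 'k', 'l', 'm', 'n', 'o', 'p', 'q', 'r', 's', 't', 'u', 'v', 'w', 'x', 'y', 'z']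
--
--     list0 = [char for char in string0]
--
--     for char_index in range(len(list0)):
--         if list0[char_index] in CAPS_LETTERS:
--             index = CAPS_LETTERS.index(list0[char_index])
--             list0[char_index] = CAPS_LETTERS[25 - index]
--         elif list0[char_index] in LOWS_LETTERS:
--             index = LOWS_LETTERS.index(list0[char_index])
--             list0[char_index] = LOWS_LETTERS[25 - index]
--
--     return ''.join(list0)
-- ===== SOURCE B (Python) =====
-- def string_mirrorer(string0):
--     def mirror(c):
--         o = ord(c)
--         if 65 <= o <= 90:
--             return chr(155 - o)
--         if 97 <= o <= 122:
--             return chr(219 - o)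
--         return c
--     return ''.join(map(mirror, string0))
-- ===== Notes on version B (the rewrite author's own statement) =====
-- stated objective: faster
-- what changed: Replaces the per-character membership tests and .index scans over 26-element letter lists by a closed-form arithmetic mirror (chr(155-ord(c)) for uppercase, chr(219-ord(c)) for lowercase) applied in a single map pass.
import Mathlib
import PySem

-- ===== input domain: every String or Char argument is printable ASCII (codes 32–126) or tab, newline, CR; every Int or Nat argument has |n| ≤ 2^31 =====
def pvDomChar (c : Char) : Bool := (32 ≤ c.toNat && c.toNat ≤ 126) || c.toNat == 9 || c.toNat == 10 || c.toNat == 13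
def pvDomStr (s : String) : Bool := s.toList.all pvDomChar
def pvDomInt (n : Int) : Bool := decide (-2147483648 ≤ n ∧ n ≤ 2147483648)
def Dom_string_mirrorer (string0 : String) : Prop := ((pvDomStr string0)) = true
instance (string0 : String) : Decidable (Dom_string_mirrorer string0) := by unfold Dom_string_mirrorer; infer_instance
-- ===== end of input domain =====

-- B replaces A's per-character scans of 26-letter lists ('in' / '.index' lookups) by the
-- arithmetic mirror 155 - code (uppercase) / 219 - code (lowercase) applied in one map pass.


-- ===== PORT A =====
def capsLetters : List Char := ['A','B','C','D','E','F','G','H','I','J','K','L','M','N','O','P','Q','R','S','T','U','V','W','X','Y','Z']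
def lowsLetters : List Char := ['a','b','c','d','e','f','g','h','i','j','k','l','m','n','o','p','q','r','s','t','u','v','w','x','y','z']

-- one body of A's for-loop: membership test, .index scan, in-place replacement of list0[char_index]
def stepA (l : List Char) (i : Nat) : List Char :=
  if capsLetters.contains (l.getD i ' ') then
    l.set i (capsLetters.getD (25 - (PySem.List.index? capsLetters (l.getD i ' ')).getD 0) ' ')
  else if lowsLetters.contains (l.getD i ' ') then
    l.set i (lowsLetters.getD (25 - (PySem.List.index? lowsLetters (l.getD i ' ')).getD 0) ' ')
  else l

def string_mirrorer (string0 : String) : String :=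
  let list0 := string0.toList
  String.ofList ((List.range list0.length).foldl stepA list0)

-- ===== PORT B =====
def mirrorChar (c : Char) : Char :=
  let o := c.toNat
  if 65 ≤ o ∧ o ≤ 90 then Char.ofNat (155 - o)
  else if 97 ≤ o ∧ o ≤ 122 then Char.ofNat (219 - o)
  else c

def string_mirrorer_alt (string0 : String) : String :=
  String.ofList (string0.toList.map mirrorChar)

-- ===== PRECONDITION & SPEC =====
def Spec_string_mirrorer (string0 : String) (out : String) : Prop := out = string_mirrorer_alt string0
instance (string0 : String) (out : String) : Decidable (Spec_string_mirrorer string0 out) := by unfold Spec_string_mirrorer; infer_instance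

-- ===== CLAIM (what is proved, stated in full; the proofs are below) =====
def Claim_equal_string_mirrorer : Prop := ∀ (string0 : String), Dom_string_mirrorer string0 → Spec_string_mirrorer string0 (string_mirrorer string0)

-- ===== LEMMAS AND PROOFS =====

lemma mem_caps_of_range (c : Char) (h1 : 65 ≤ c.toNat) (h2 : c.toNat ≤ 90) : c ∈ capsLetters := by
  have hc := Char.ofNat_toNat c
  interval_cases h : c.toNat <;> (rw [← hc]; decide)

lemma mem_lows_of_range (c : Char) (h1 : 97 ≤ c.toNat) (h2 : c.toNat ≤ 122) : c ∈ lowsLetters := by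
  have hc := Char.ofNat_toNat c
  interval_cases h : c.toNat <;> (rw [← hc]; decide)

-- the value A writes at a position equals B's arithmetic mirror of the character there
lemma stepA_value_eq_mirror (c : Char) :
    (if capsLetters.contains c then capsLetters.getD (25 - (PySem.List.index? capsLetters c).getD 0) ' '
     else if lowsLetters.contains c then lowsLetters.getD (25 - (PySem.List.index? lowsLetters c).getD 0) ' '
     else c) = mirrorChar c := by
  by_cases hc : capsLetters.contains c
  · have hm : c ∈ capsLetters := by simpa using hc
    fin_cases hm <;> decide
  · by_cases hl : lowsLetters.contains c
    · have hm : c ∈ lowsLetters := by simpa using hl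
      fin_cases hm <;> decide
    · have hc' : c ∉ capsLetters := by simpa using hc
      have hl' : c ∉ lowsLetters := by simpa using hl
      have hcap : ¬ (65 ≤ c.toNat ∧ c.toNat ≤ 90) := fun ⟨a, b⟩ =>
        hc' (mem_caps_of_range c a b)
      have hlow : ¬ (97 ≤ c.toNat ∧ c.toNat ≤ 122) := fun ⟨a, b⟩ =>
        hl' (mem_lows_of_range c a b)
      simp [hc', hl', mirrorChar, hcap, hlow]

-- A's loop body is exactly "write the mirrored character back at index i"
lemma stepA_eq_set_mirror (l : List Char) (i : Nat) :
    stepA l i = l.set i (mirrorChar (l.getD i ' ')) := by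
  unfold stepA
  have hv := stepA_value_eq_mirror (l.getD i ' ')
  split_ifs at hv ⊢ with h1 h2
  · rw [hv]
  · rw [hv]
  · rw [← hv]
    by_cases hi : i < l.length
    · rw [List.getD_eq_getElem l ' ' hi]
      exact (List.set_getElem_self hi).symm
    · exact (List.set_eq_of_length_le (Nat.le_of_not_lt hi)).symm

-- left-to-right index loop writing g at each position = map g
lemma foldl_set_eq_map (g : Char → Char) (d : Char) (n : Nat) (l : List Char) (h : n ≤ l.length) :
    (List.range n).foldl (fun a i => a.set i (g (a.getD i d))) l
      = (l.take n).map g ++ l.drop n := by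
  induction n with
  | zero => simp
  | succ n ih =>
    have hn : n < l.length := by omega
    rw [List.range_succ, List.foldl_append, ih (by omega)]
    simp only [List.foldl_cons, List.foldl_nil]
    have hlen : ((l.take n).map g).length = n := by
      simp [List.length_take, Nat.min_eq_left (le_of_lt hn)]
    have hget : ((l.take n).map g ++ l.drop n).getD n d = l[n] := by
      rw [List.getD_eq_getElem?_getD, List.getElem?_append_right (by omega)]
      rw [hlen, Nat.sub_self]
      rw [List.drop_eq_getElem_cons hn]
      simp [List.getElem?_eq_getElem hn]
    have hset : ((l.take n).map g ++ l.drop n).set n (g l[n])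
        = (l.take n).map g ++ (g l[n] :: l.drop (n + 1)) := by
      rw [List.set_append, if_neg (by omega), hlen, Nat.sub_self]
      rw [List.drop_eq_getElem_cons hn]
      rfl
    rw [hget, hset]
    have htake : List.map g (List.take (n + 1) l) = List.map g (List.take n l) ++ [g l[n]] := by
      rw [List.take_add_one, List.getElem?_eq_getElem hn]
      simp only [Option.toList_some, List.map_append, List.map_cons, List.map_nil]
    rw [htake]
    simp

-- ===== VERDICT (by name: the statement is the Claim_ definition above) =====
theorem string_mirrorer_spec : Claim_equal_string_mirrorer := by
  intro s _
  show String.ofList ((List.range s.toList.length).foldl stepA s.toList)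
      = String.ofList (s.toList.map mirrorChar)
  have hstep : stepA = fun (a : List Char) (i : Nat) => a.set i (mirrorChar (a.getD i ' ')) :=
    funext fun a => funext fun i => stepA_eq_set_mirror a i
  rw [hstep, foldl_set_eq_map mirrorChar ' ' s.toList.length s.toList le_rfl]
  rw [List.take_length, List.drop_length]
  simp
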